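-- pv_equiv track=rewrite | github.com/lilleswing/adventcode | 2016/day14.py | get_triple
-- ===== SOURCE A (Python) =====
-- def get_triple(s):
--   elems = set()
--   for i in range(3, len(s)+1):
--     s1 = set(s[i - 3:i])
--     if len(s1) == 1:
--       elems.add(list(s1)[0])
--       return list(s1)[0]
--   return None
-- ===== SOURCE B (Python) =====
-- def get_triple(s):
--   prev = None
--   count = 0
--   for c in s:
--     if c == prev:
--       count += 1
--       if count == 3:
--         return c
--     else:
--       prev = c
--       count = 1
--   return None
-- ===== Notes on version B (the rewrite author's own statement) =====
-- stated objective: alternative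
-- what changed: B replaces A's per-index window slicing and set-building (s[i-3:i], set, len==1) with a single incremental run-length scan keeping prev/count across iterations and returning when the run reaches 3.
import Mathlib
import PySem

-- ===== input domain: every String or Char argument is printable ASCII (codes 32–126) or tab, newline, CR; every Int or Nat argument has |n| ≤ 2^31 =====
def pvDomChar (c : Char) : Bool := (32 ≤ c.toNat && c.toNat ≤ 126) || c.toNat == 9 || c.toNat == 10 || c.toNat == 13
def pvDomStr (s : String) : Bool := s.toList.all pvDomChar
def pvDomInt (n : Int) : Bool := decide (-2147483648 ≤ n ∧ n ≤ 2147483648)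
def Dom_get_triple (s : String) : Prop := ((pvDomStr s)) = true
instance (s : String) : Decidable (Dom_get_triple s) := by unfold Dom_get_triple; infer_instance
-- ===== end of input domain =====

-- B replaces A's per-index window slice + set test with an incremental prev/count run-length scan (alternative decomposition; return value equivalence proved).

-- ===== PORT A =====
-- loop 'for i in range(3, len(s)+1)': elems is the Python local set (only written right before the return)
def getTripleLoopA (cs : List Char) (elems : PySem.Set Char) : List Int → Option String
  | [] => none
  | i :: rest =>
    let s1 : PySem.Set Char := PySem.Set.ofList (PySem.List.slice cs (some (i - 3)) (some i))
    if PySem.Set.len s1 = 1 then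
      let _ := PySem.Set.add elems ((PySem.List.pyGetD s1 0 'a'))  -- elems.add(list(s1)[0]); s1 nonempty here
      match PySem.List.pyGet? s1 0 with                            -- list(s1)[0]
      | some c => some (String.ofList [c])
      | none => none
    else getTripleLoopA cs elems rest

def get_triple (s : String) : Option String :=
  getTripleLoopA s.toList PySem.Set.empty
    (PySem.List.pyRange 3 (PySem.List.len s.toList + 1) 1)

-- ===== PORT B =====
def getTripleLoopB : List Char → Option Char → Int → Option String
  | [], _, _ => none
  | c :: rest, prev, count =>
    if prev = some c then
      if count + 1 = 3 then some (String.ofList [c])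
      else getTripleLoopB rest prev (count + 1)
    else getTripleLoopB rest (some c) 1

def get_triple_alt (s : String) : Option String :=
  getTripleLoopB s.toList none 0

-- ===== PRECONDITION & SPEC =====
def Spec_get_triple (s : String) (out : Option String) : Prop := out = get_triple_alt s
instance (s : String) (out : Option String) : Decidable (Spec_get_triple s out) := by unfold Spec_get_triple; infer_instance

-- ===== CLAIM (what is proved, stated in full; the proofs are below) =====
def Claim_equal_get_triple : Prop := ∀ (s : String), Dom_get_triple s → Spec_get_triple s (get_triple s)

-- ===== LEMMAS AND PROOFS =====

-- common characterisation: the first index whose 3-char window is constant, scanned left to right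
def firstTriple : List Char → Option String
  | a :: b :: c :: r => if a = b ∧ b = c then some (String.ofList [a]) else firstTriple (b :: c :: r)
  | _ => none

theorem firstTriple_short (cs : List Char) (h : cs.length < 3) : firstTriple cs = none := by
  match cs, h with
  | [], _ => rfl
  | [_], _ => rfl
  | [_, _], _ => rfl

theorem firstTriple_ne (x y : Char) (r : List Char) (h : x ≠ y) :
    firstTriple (x :: y :: r) = firstTriple (y :: r) := by
  cases r with
  | nil => rfl
  | cons z r' => simp [firstTriple, h]

-- B side: run-counter invariants
theorem loopB_inv (r : List Char) :
    (∀ x, getTripleLoopB r (some x) 2 = firstTriple (x :: x :: r)) ∧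
    (∀ x, getTripleLoopB r (some x) 1 = firstTriple (x :: r)) := by
  induction r with
  | nil =>
    constructor <;> intro x <;> rfl
  | cons y r' ih =>
    constructor
    · intro x
      by_cases hxy : x = y
      · subst hxy
        simp [getTripleLoopB, firstTriple]
      · have h2 : getTripleLoopB (y :: r') (some x) 2 = getTripleLoopB r' (some y) 1 := by
          simp [getTripleLoopB, hxy]
        rw [h2, ih.2 y]
        have e1 : firstTriple (x :: x :: y :: r') = firstTriple (x :: y :: r') := by
          simp [firstTriple, hxy]
        rw [e1, firstTriple_ne x y r' hxy]
    · intro x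
      by_cases hxy : x = y
      · subst hxy
        have h1 : getTripleLoopB (x :: r') (some x) 1 = getTripleLoopB r' (some x) 2 := by
          simp [getTripleLoopB]
        rw [h1, ih.1 x]
      · have h1 : getTripleLoopB (y :: r') (some x) 1 = getTripleLoopB r' (some y) 1 := by
          simp [getTripleLoopB, hxy]
        rw [h1, ih.2 y, firstTriple_ne x y r' hxy]

theorem loopB_top (cs : List Char) : getTripleLoopB cs none 0 = firstTriple cs := by
  cases cs with
  | nil => rfl
  | cons c r =>
    have : getTripleLoopB (c :: r) none 0 = getTripleLoopB r (some c) 1 := by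
      simp [getTripleLoopB]
    rw [this, (loopB_inv r).2 c]

-- A side: window at offset k
theorem setOfWindow_len (a b c : Char) :
    PySem.Set.len (PySem.Set.ofList [a, b, c]) = 1 ↔ (a = b ∧ b = c) := by
  by_cases h1 : a = b <;> by_cases h2 : b = c <;>
    subst_eqs <;> simp_all [PySem.Set.ofList, PySem.Set.add, PySem.Set.len,
      PySem.Set.contains, PySem.Set.empty] <;> split_ifs <;> simp_all

theorem loopA_eq (j : Nat) : ∀ (cs : List Char) (k : Nat) (elems : PySem.Set Char),
    cs.length ≤ k + j →
    getTripleLoopA cs elems (PySem.List.pyRange (3 + (k : Int)) (cs.length + 1) 1)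
      = firstTriple (cs.drop k) := by
  induction j with
  | zero =>
    intro cs k elems hle
    have hempty : PySem.List.pyRange (3 + (k : Int)) (cs.length + 1) 1 = [] := by
      rw [PySem.List.pyRange_one]
      have : ((cs.length : Int) + 1 - (3 + (k : Int))).toNat = 0 := by omega
      rw [this]; rfl
    rw [hempty]
    have : (cs.drop k).length < 3 := by
      rw [List.length_drop]; omega
    rw [firstTriple_short _ this]; rfl
  | succ j ih =>
    intro cs k elems hle
    by_cases hlt : (3 : Int) + k < cs.length + 1
    · rw [PySem.List.pyRange_one_cons hlt]
      have hk3 : k + 3 ≤ cs.length := by omega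
      -- the window s[k : k+3]
      have hslice : PySem.List.slice cs (some ((3 : Int) + k - 3)) (some ((3 : Int) + k))
          = (cs.drop k).take 3 := by
        have h1 : ((3 : Int) + k - 3) = ((k : Nat) : Int) := by omega
        have h2 : ((3 : Int) + k) = ((k : Nat) : Int) + ((3 : Nat) : Int) := by push_cast; ring
        rw [h1, h2, PySem.List.slice_natCast_add]
      obtain ⟨a, b, c, r, hd⟩ : ∃ a b c r, cs.drop k = a :: b :: c :: r := by
        have h3 : 3 ≤ (cs.drop k).length := by rw [List.length_drop]; omega
        match hx : cs.drop k, h3 with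
        | a :: b :: c :: r, _ => exact ⟨a, b, c, r, rfl⟩
      have hwin : (cs.drop k).take 3 = [a, b, c] := by rw [hd]; rfl
      have hdrop1 : cs.drop (k + 1) = b :: c :: r := by
        rw [← List.tail_drop, hd]; rfl
      by_cases heq : a = b ∧ b = c
      · -- window constant: A returns its element
        have hset : PySem.Set.ofList ((cs.drop k).take 3) = [a] := by
          obtain ⟨h1, h2⟩ := heq; subst h1; subst h2
          rw [hwin]
          simp [PySem.Set.ofList, PySem.Set.add, PySem.Set.contains, PySem.Set.empty]
        simp only [getTripleLoopA, hslice, hset]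
        rw [hd]
        simp [firstTriple, heq, PySem.Set.len]
      · -- not constant: skip to the next index
        have hlen : ¬ PySem.Set.len (PySem.Set.ofList ((cs.drop k).take 3)) = 1 := by
          rw [hwin]; exact fun h => heq ((setOfWindow_len a b c).mp h)
        simp only [getTripleLoopA, hslice, hlen, if_false]
        have harg : (3 : Int) + (k : Int) + 1 = 3 + ((k + 1 : Nat) : Int) := by push_cast; ring
        rw [harg, ih cs (k + 1) elems (by omega), hdrop1, hd]
        simp [firstTriple, heq]
    · have hempty : PySem.List.pyRange (3 + (k : Int)) (cs.length + 1) 1 = [] := by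
        rw [PySem.List.pyRange_one]
        have : ((cs.length : Int) + 1 - (3 + (k : Int))).toNat = 0 := by omega
        rw [this]; rfl
      rw [hempty]
      have : (cs.drop k).length < 3 := by rw [List.length_drop]; omega
      rw [firstTriple_short _ this]; rfl

-- ===== VERDICT (by name: the statement is the Claim_ definition above) =====
theorem get_triple_spec : Claim_equal_get_triple := by
  intro s _
  unfold Spec_get_triple get_triple get_triple_alt
  rw [loopB_top]
  have := loopA_eq s.toList.length s.toList 0 PySem.Set.empty (by omega)
  simpa [PySem.List.len_eq] using this
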